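-- pv_equiv track=rewrite | github.com/gugwana-phikolomzi/isiXhosa-ai-Kedro-flow-v3 | src/main/pipelines/model_common/nodes.py | _concat_packs_to_1d
-- ===== SOURCE A (Python) =====
-- from typing import Dict, Tuple, List, Any, Optional
--
-- def _concat_packs_to_1d(packs: List[List[int]], eos_id: Optional[int]) -> Tuple[List[int], List[Tuple[int,int]]]:
--     """
--     Flatten packs to a 1D stream and return (stream, ranges) where
--     ranges is a list of (start, end) offsets (exclusive) per pack in the flat stream.
--     """
--     flat: List[int] = []
--     ranges: List[Tuple[int,int]] = []
--     pos = 0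
--     for p in packs:
--         start = pos
--         flat.extend(p); pos += len(p)
--         if eos_id is not None:
--             flat.append(int(eos_id)); pos += 1
--         end = pos  # exclusive
--         ranges.append((start, end))
--     return flat, ranges
-- ===== SOURCE B (Python) =====
-- def _concat_packs_to_1d(packs, eos_id):
--     """Prefix-sum the pack widths for the ranges, build the flat stream separately."""
--     extra = 0 if eos_id is None else 1
--     tail = [] if eos_id is None else [int(eos_id)]
--     offsets = [0]
--     for p in packs:
--         offsets.append(offsets[-1] + len(p) + extra)
--     ranges = list(zip(offsets[:-1], offsets[1:]))
--     flat = [x for p in packs for x in p + tail]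
--     return flat, ranges
-- ===== Notes on version B (the rewrite author's own statement) =====
-- stated objective: alternative
-- what changed: Replaces the single loop with a shared position counter by two independent passes: ranges come from zipping consecutive prefix sums of the pack widths (len(p) plus one for eos), and the flat stream is built by a separate comprehension appending the eos tail to each pack.
import Mathlib
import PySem

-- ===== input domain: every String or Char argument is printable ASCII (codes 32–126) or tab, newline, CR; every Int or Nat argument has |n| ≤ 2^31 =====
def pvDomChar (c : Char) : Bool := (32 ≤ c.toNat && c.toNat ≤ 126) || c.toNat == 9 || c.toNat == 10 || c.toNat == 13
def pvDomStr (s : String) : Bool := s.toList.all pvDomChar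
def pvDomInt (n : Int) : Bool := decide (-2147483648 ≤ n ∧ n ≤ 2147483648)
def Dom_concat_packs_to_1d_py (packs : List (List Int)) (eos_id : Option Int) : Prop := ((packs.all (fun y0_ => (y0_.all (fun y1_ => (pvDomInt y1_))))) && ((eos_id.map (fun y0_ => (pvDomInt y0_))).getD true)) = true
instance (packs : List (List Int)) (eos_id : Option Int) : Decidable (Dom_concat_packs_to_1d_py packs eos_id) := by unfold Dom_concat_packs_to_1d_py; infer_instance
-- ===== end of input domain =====

-- B decouples the two outputs: ranges from zipped prefix sums of pack widths, flat from a
-- separate flatMap pass; same asymptotic cost, different decomposition (objective: alternative).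

-- ===== PORT A =====
-- one loop over packs carrying (flat, ranges, pos); per pack: extend flat, bump pos,
-- optionally append eos, then record (start, pos)
def concat_packs_to_1d_py (packs : List (List Int)) (eos_id : Option Int) : List Int × (List (Int × Int)) :=
  let st := packs.foldl
    (fun (st : List Int × List (Int × Int) × Int) p =>
      let start := st.2.2
      let fp : List Int × Int :=
        match eos_id with
        | some e => (st.1 ++ p ++ [e], st.2.2 + (p.length : Int) + 1)
        | none   => (st.1 ++ p, st.2.2 + (p.length : Int))
      (fp.1, st.2.1 ++ [(start, fp.2)], fp.2))
    ([], [], 0)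
  (st.1, st.2.1)

-- ===== PORT B =====
-- offsets = prefix sums of widths (len p + extra), ranges = zip of consecutive offsets,
-- flat built independently by appending the eos tail to each pack
def concat_packs_to_1d_py_alt (packs : List (List Int)) (eos_id : Option Int) : List Int × (List (Int × Int)) :=
  let extra : Int := match eos_id with | none => 0 | some _ => 1
  let tail : List Int := match eos_id with | none => [] | some e => [e]
  let offsets : List Int :=
    packs.foldl (fun acc p => acc ++ [acc.getLast! + (p.length : Int) + extra]) [0]
  let ranges := offsets.dropLast.zip (offsets.drop 1)
  let flat := packs.flatMap (fun p => p ++ tail)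
  (flat, ranges)

-- ===== PRECONDITION & SPEC =====
def Spec_concat_packs_to_1d_py (packs : List (List Int)) (eos_id : Option Int) (out : List Int × (List (Int × Int))) : Prop := out = concat_packs_to_1d_py_alt packs eos_id
instance (packs : List (List Int)) (eos_id : Option Int) (out : List Int × (List (Int × Int))) : Decidable (Spec_concat_packs_to_1d_py packs eos_id out) := by unfold Spec_concat_packs_to_1d_py; infer_instance

-- ===== CLAIM (what is proved, stated in full; the proofs are below) =====
def Claim_equal_concat_packs_to_1d_py : Prop := ∀ (packs : List (List Int)) (eos_id : Option Int), Dom_concat_packs_to_1d_py packs eos_id → Spec_concat_packs_to_1d_py packs eos_id (concat_packs_to_1d_py packs eos_id)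

-- ===== LEMMAS AND PROOFS =====

def pvExtra : Option Int → Int
  | none => 0
  | some _ => 1

def pvTail : Option Int → List Int
  | none => []
  | some e => [e]

/-- the tail of the prefix-sum list starting after offset `o` -/
def pvScan (extra : Int) (o : Int) : List (List Int) → List Int
  | [] => []
  | p :: ps => (o + (p.length : Int) + extra) :: pvScan extra (o + (p.length : Int) + extra) ps

/-- reference form of the ranges list starting at offset `o` -/
def pvRanges (extra : Int) (o : Int) : List (List Int) → List (Int × Int)
  | [] => []
  | p :: ps => (o, o + (p.length : Int) + extra) :: pvRanges extra (o + (p.length : Int) + extra) ps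

lemma getLast!_eq_getLast (l : List Int) (h : l ≠ []) : l.getLast! = l.getLast h := by
  cases l with
  | nil => exact absurd rfl h
  | cons a as => rfl

lemma offsets_eq (eos_id : Option Int) :
    ∀ (ps : List (List Int)) (acc : List Int) (o : Int), acc.getLast! = o →
      ps.foldl (fun acc p => acc ++ [acc.getLast! + (p.length : Int) +
          (match eos_id with | none => 0 | some _ => 1)]) acc
        = acc ++ pvScan (pvExtra eos_id) o ps := by
  intro ps
  induction ps with
  | nil => intro acc o h; simp [pvScan]
  | cons p ps ih =>
    intro acc o h
    have hlast : (acc ++ [o + (p.length : Int) + pvExtra eos_id]).getLast!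
        = o + (p.length : Int) + pvExtra eos_id := by
      rw [getLast!_eq_getLast _ (by simp)]; exact List.getLast_append_singleton _
    cases eos_id <;>
      simp only [List.foldl_cons, h, pvExtra] at * <;>
      rw [ih _ _ hlast] <;> simp [pvScan]

lemma zip_scan (extra : Int) :
    ∀ (ps : List (List Int)) (o : Int),
      ((o :: pvScan extra o ps).dropLast).zip (pvScan extra o ps) = pvRanges extra o ps := by
  intro ps
  induction ps with
  | nil => intro o; simp [pvScan, pvRanges]
  | cons p ps ih =>
    intro o
    simp only [pvScan, pvRanges]
    rw [List.dropLast_cons_of_ne_nil (by simp)]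
    simp only [List.zip_cons_cons]
    rw [ih]

lemma foldA (eos_id : Option Int) :
    ∀ (ps : List (List Int)) (flat : List Int) (rs : List (Int × Int)) (pos : Int),
      ps.foldl
        (fun (st : List Int × List (Int × Int) × Int) p =>
          let start := st.2.2
          let fp : List Int × Int :=
            match eos_id with
            | some e => (st.1 ++ p ++ [e], st.2.2 + (p.length : Int) + 1)
            | none   => (st.1 ++ p, st.2.2 + (p.length : Int))
          (fp.1, st.2.1 ++ [(start, fp.2)], fp.2))
        (flat, rs, pos)
      = (flat ++ ps.flatMap (fun p => p ++ pvTail eos_id),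
         rs ++ pvRanges (pvExtra eos_id) pos ps,
         pos + ((ps.map (fun p => (p.length : Int) + pvExtra eos_id)).sum)) := by
  intro ps
  induction ps with
  | nil => intro flat rs pos; simp [pvRanges]
  | cons p ps ih =>
    intro flat rs pos
    cases eos_id with
    | none =>
      simp only [List.foldl_cons]
      rw [ih]
      simp [pvRanges, pvTail, pvExtra, List.append_assoc]
      ring
    | some e =>
      simp only [List.foldl_cons]
      rw [ih]
      simp [pvRanges, pvTail, pvExtra, List.append_assoc]
      ring

-- ===== VERDICT (by name: the statement is the Claim_ definition above) =====
theorem concat_packs_to_1d_py_spec : Claim_equal_concat_packs_to_1d_py := by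
  intro packs eos_id _
  unfold Spec_concat_packs_to_1d_py
  simp only [concat_packs_to_1d_py, concat_packs_to_1d_py_alt]
  rw [foldA eos_id packs [] [] 0, offsets_eq eos_id packs [0] 0 rfl]
  cases eos_id <;>
    simp only [pvExtra, pvTail, List.nil_append, List.singleton_append,
      List.drop_succ_cons, List.drop_zero] <;>
    rw [zip_scan]
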